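-- pv_equiv track=rewrite | github.com/roctbb/ai-game-engine | games/tic_tac_toe/examples/connect5_balanced.py | has_five
-- ===== SOURCE A (Python) =====
-- def has_five(field, role):
--     directions = ((1, 0), (0, 1), (1, 1), (1, -1))
--     for x in range(len(field)):
--         for y in range(len(field[x])):
--             if field[x][y] != role:
--                 continue
--             for dx, dy in directions:
--                 if count_line(field, x, y, dx, dy, role) >= 5:
--                     return True
--     return False
--
-- def count_line(field, x, y, dx, dy, role):
--     count = 0
--     while 0 <= x < len(field) and 0 <= y < len(field[x]) and field[x][y] == role:
--         count += 1
--         x += dx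
--         y += dy
--     return count
-- ===== SOURCE B (Python) =====
-- def has_five(field, role):
--     h = len(field)
--     w = max((len(r) for r in field), default=0)
--
--     def cell(x, y):
--         row = field[x]
--         return row[y] if 0 <= y < len(row) else None
--
--     def run5(cells):
--         run = 0
--         for c in cells:
--             run = run + 1 if c == role else 0
--             if run >= 5:
--                 return True
--         return False
--
--     lines = []
--     for x in range(h):
--         lines.append([cell(x, y) for y in range(w)])          # rows
--     for y in range(w):
--         lines.append([cell(x, y) for x in range(h)])          # columns
--     for c in range(-h + 1, w):
--         lines.append([cell(x, c + x) for x in range(h)])      # diagonals (1, 1)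
--     for c in range(w + h - 1):
--         lines.append([cell(x, c - x) for x in range(h)])      # anti-diagonals (1, -1)
--     return any(run5(line) for line in lines)
-- ===== Notes on version B (the rewrite author's own statement) =====
-- stated objective: alternative
-- what changed: instead of probing four directions with an unbounded while-loop counter from every role cell, B extracts every board line (rows, columns, and both diagonal families, with None padding for ragged rows) and makes a single streaming run-counter pass over each line, returning as soon as a run reaches 5
import Mathlib
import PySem

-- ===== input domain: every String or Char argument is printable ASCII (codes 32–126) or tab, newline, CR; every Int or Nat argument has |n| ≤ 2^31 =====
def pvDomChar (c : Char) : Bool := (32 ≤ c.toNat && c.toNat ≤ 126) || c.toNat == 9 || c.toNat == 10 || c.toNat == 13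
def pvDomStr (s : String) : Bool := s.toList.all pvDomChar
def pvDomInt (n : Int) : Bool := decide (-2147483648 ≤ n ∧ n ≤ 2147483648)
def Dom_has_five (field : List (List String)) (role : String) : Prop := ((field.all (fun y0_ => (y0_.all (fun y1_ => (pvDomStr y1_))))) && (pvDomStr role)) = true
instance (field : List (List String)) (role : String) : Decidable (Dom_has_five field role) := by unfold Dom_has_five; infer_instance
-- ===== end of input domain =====

-- B replaces A's per-cell directional probing (count_line from every role cell) by
-- extracting every board line (rows, columns, both diagonal families) and making one
-- streaming run-counter pass over each line (objective: alternative).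

-- ===== PORT A =====
-- Python's loop/window condition '0 <= x < len(field) and 0 <= y < len(field[x]) and field[x][y] == role'
def cellOk (field : List (List String)) (x y : Int) (role : String) : Bool :=
  decide (0 ≤ x) && decide (x < (field.length : Int)) &&
    (let row := (PySem.List.pyGet? field x).getD []
     decide (0 ≤ y) && decide (y < (row.length : Int)) &&
       ((PySem.List.pyGet? row y).getD "" == role))

-- fuel is a totality device only: the while loop's test is cellOk, its state updates are
-- x += dx, y += dy, count += 1, exactly as in Python; fuel (h + max row length + 5 at the
-- call site) exceeds any possible run length for the four directions used.
def count_line (fuel : Nat) (field : List (List String)) (x y dx dy : Int)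
    (role : String) (count : Int) : Int :=
  match fuel with
  | 0 => count
  | Nat.succ f =>
      if cellOk field x y role then
        count_line f field (x + dx) (y + dy) dx dy role (count + 1)
      else count

def has_five (field : List (List String)) (role : String) : Bool :=
  let fuel := field.length + field.foldl (fun a r => max a r.length) 0 + 5
  (PySem.List.pyRange 0 (field.length : Int) 1).any (fun x =>
    let row := (PySem.List.pyGet? field x).getD []
    (PySem.List.pyRange 0 (row.length : Int) 1).any (fun y =>
      ((PySem.List.pyGet? row y).getD "" == role) &&
        ([((1:Int),(0:Int)), (0,1), (1,1), (1,-1)].any (fun d =>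
          decide (5 ≤ count_line fuel field x y d.1 d.2 role 0)))))

-- ===== PORT B =====
-- Python's cell(x, y): field[x][y] if 0 <= y < len(field[x]) else None (x always in range at call sites)
def cellB (field : List (List String)) (x y : Int) : Option String :=
  let row := (PySem.List.pyGet? field x).getD []
  if decide (0 ≤ y) && decide (y < (row.length : Int)) then
    some ((PySem.List.pyGet? row y).getD "")
  else none

-- Python's run5: a streaming run counter over one line, early return at 5
def run5go (role : String) : List (Option String) → Int → Bool
  | [], _ => false
  | c :: rest, run =>
      let run := if c == some role then run + 1 else 0
      if 5 ≤ run then true else run5go role rest run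

def has_five_alt (field : List (List String)) (role : String) : Bool :=
  let h := field.length
  let w := field.foldl (fun a r => max a r.length) 0
  let lines : List (List (Option String)) :=
    ((List.range h).map (fun (x : Nat) => (List.range w).map (fun (y : Nat) => cellB field (x : Int) (y : Int))))
    ++ ((List.range w).map (fun (y : Nat) => (List.range h).map (fun (x : Nat) => cellB field (x : Int) (y : Int))))
    ++ ((PySem.List.pyRange (-(h:Int)+1) (w:Int) 1).map (fun (c : Int) => (List.range h).map (fun (x : Nat) => cellB field (x : Int) (c + (x : Int)))))
    ++ ((List.range (w + h - 1)).map (fun (c : Nat) => (List.range h).map (fun (x : Nat) => cellB field (x : Int) ((c : Int) - (x : Int)))))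
  lines.any (fun line => run5go role line 0)

-- ===== PRECONDITION & SPEC =====
def Spec_has_five (field : List (List String)) (role : String) (out : Bool) : Prop := out = has_five_alt field role
instance (field : List (List String)) (role : String) (out : Bool) : Decidable (Spec_has_five field role out) := by unfold Spec_has_five; infer_instance

-- ===== CLAIM (what is proved, stated in full; the proofs are below) =====
def Claim_equal_has_five : Prop := ∀ (field : List (List String)) (role : String), Dom_has_five field role → Spec_has_five field role (has_five field role)

-- ===== LEMMAS AND PROOFS =====

-- five-cell window starting at (x, y) in direction (dx, dy)
def winB (field : List (List String)) (role : String) (x y dx dy : Int) : Bool :=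
  cellOk field x y role &&
  cellOk field (x + dx) (y + dy) role &&
  cellOk field (x + 2 * dx) (y + 2 * dy) role &&
  cellOk field (x + 3 * dx) (y + 3 * dy) role &&
  cellOk field (x + 4 * dx) (y + 4 * dy) role

def HasWin (field : List (List String)) (role : String) : Prop :=
  ∃ x y : Int, winB field role x y 1 0 = true ∨ winB field role x y 0 1 = true ∨
    winB field role x y 1 1 = true ∨ winB field role x y 1 (-1) = true

theorem count_line_lb (fuel : Nat) (field : List (List String)) (x y dx dy : Int)
    (role : String) (count : Int) :
    count ≤ count_line fuel field x y dx dy role count := by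
  induction fuel generalizing x y count with
  | zero => simp [count_line]
  | succ f ih =>
      simp only [count_line]
      split
      · exact le_trans (by omega) (ih (x + dx) (y + dy) (count + 1))
      · exact le_rfl

-- the while loop, entered with count = 0, reaches 5 iff the next five cells are ok
theorem count_line_window (f5 : Nat) (field : List (List String)) (x y dx dy : Int)
    (role : String) :
    decide (5 ≤ count_line (f5 + 5) field x y dx dy role 0) = winB field role x y dx dy := by
  have h2 : x + dx + dx = x + 2 * dx := by ring
  have h3 : x + 2 * dx + dx = x + 3 * dx := by ring
  have h4 : x + 3 * dx + dx = x + 4 * dx := by ring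
  have k2 : y + dy + dy = y + 2 * dy := by ring
  have k3 : y + 2 * dy + dy = y + 3 * dy := by ring
  have k4 : y + 3 * dy + dy = y + 4 * dy := by ring
  show decide (5 ≤ count_line (f5 + 1 + 1 + 1 + 1 + 1) field x y dx dy role 0) = _
  simp only [count_line, winB, h2, h3, h4, k2, k3, k4]
  by_cases c0 : cellOk field x y role = true
  · by_cases c1 : cellOk field (x + dx) (y + dy) role = true
    · by_cases c2 : cellOk field (x + 2 * dx) (y + 2 * dy) role = true
      · by_cases c3 : cellOk field (x + 3 * dx) (y + 3 * dy) role = true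
        · by_cases c4 : cellOk field (x + 4 * dx) (y + 4 * dy) role = true
          · simp only [c0, c1, c2, c3, c4, if_true]
            have := count_line_lb f5 field (x + 4 * dx + dx) (y + 4 * dy + dy) dx dy role 5
            simp only [show (0:Int)+1+1+1+1+1 = 5 by norm_num] at *
            simp
            omega
          · simp [c0, c1, c2, c3, c4]
        · simp [c0, c1, c2, c3]
      · simp [c0, c1, c2]
    · simp [c0, c1]
  · simp [c0]

theorem cellOk_elim {field : List (List String)} {role : String} {x y : Int}
    (h : cellOk field x y role = true) :
    0 ≤ x ∧ x < (field.length : Int) ∧ 0 ≤ y ∧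
      y < (((PySem.List.pyGet? field x).getD []).length : Int) ∧
      ((PySem.List.pyGet? ((PySem.List.pyGet? field x).getD []) y).getD "" == role) = true := by
  simp only [cellOk, Bool.and_eq_true, decide_eq_true_eq] at h
  tauto

theorem A_iff (field : List (List String)) (role : String) :
    has_five field role = true ↔ HasWin field role := by
  unfold has_five HasWin
  simp only [count_line_window, List.any_eq_true, List.mem_cons, List.not_mem_nil,
    Bool.and_eq_true, PySem.List.mem_pyRange_one]
  constructor
  · rintro ⟨x, hx, y, hy, hm, d, hd, hw⟩
    refine ⟨x, y, ?_⟩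
    rcases hd with h | h | h | h | h <;> subst_eqs <;> simp_all
  · rintro ⟨x, y, hw⟩
    have hc0 : cellOk field x y role = true := by
      rcases hw with h | h | h | h <;> (simp only [winB, Bool.and_eq_true] at h; exact h.1.1.1.1)
    obtain ⟨hx0, hxh, hy0, hyr, hm⟩ := cellOk_elim hc0
    refine ⟨x, ⟨hx0, hxh⟩, y, ⟨hy0, hyr⟩, hm, ?_⟩
    rcases hw with h | h | h | h
    · exact ⟨(1,0), by tauto, by simpa using h⟩
    · exact ⟨(0,1), by tauto, by simpa using h⟩
    · exact ⟨(1,1), by tauto, by simpa using h⟩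
    · exact ⟨(1,-1), by tauto, by simpa using h⟩

theorem run5go_iff (role : String) (cells : List (Option String)) (r : Int) (hr : 0 ≤ r) :
    run5go role cells r = true ↔
      ∃ j : Nat, j < cells.length ∧ 4 ≤ r + (j : Int) ∧
        ∀ t : Nat, t ≤ j → j ≤ t + 4 → cells[t]? = some (some role) := by
  induction cells generalizing r with
  | nil => simp [run5go]
  | cons c rest ih =>
    simp only [run5go]
    by_cases hc : (c == some role) = true
    · have hcv : c = some role := by simpa using hc
      simp only [hc, if_true]
      by_cases h5 : (5:Int) ≤ r + 1
      · simp only [if_pos h5, true_iff]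
        exact ⟨0, by simp, by simpa using by omega, fun t ht _ => by
          interval_cases t; simp [hcv]⟩
      · rw [if_neg h5, ih (r+1) (by omega)]
        constructor
        · rintro ⟨j, hj, h4, hall⟩
          refine ⟨j+1, by simpa using hj, by push_cast at h4 ⊢; omega, fun t ht hle => ?_⟩
          match t with
          | 0 => simp [hcv]
          | Nat.succ t' => simpa using hall t' (by omega) (by omega)
        · rintro ⟨j, hj, h4, hall⟩
          match j with
          | 0 => exfalso; omega
          | Nat.succ j' =>
            refine ⟨j', by simpa using hj, by push_cast at h4 ⊢; omega, fun t ht hle => ?_⟩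
            simpa using hall (t+1) (by omega) (by omega)
    · rw [if_neg hc, if_neg (by norm_num : ¬(5:Int) ≤ 0), ih 0 le_rfl]
      constructor
      · rintro ⟨j, hj, h4, hall⟩
        refine ⟨j+1, by simpa using hj, by push_cast at h4 ⊢; omega, fun t ht hle => ?_⟩
        match t with
        | 0 => exfalso; omega
        | Nat.succ t' => simpa using hall t' (by omega) (by omega)
      · rintro ⟨j, hj, h4, hall⟩
        match j with
        | 0 => exact absurd (by simpa using hall 0 (by omega) (by omega)) (by simpa using hc)
        | Nat.succ j' =>
          by_cases hj4 : 4 ≤ j'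
          · refine ⟨j', by simpa using hj, by omega, fun t ht hle => ?_⟩
            simpa using hall (t+1) (by omega) (by omega)
          · exact absurd (by simpa using hall 0 (by omega) (by omega)) (by simpa using hc)
theorem run5_line_iff (role : String) (L : Nat) (f : Nat → Option String) :
    run5go role ((List.range L).map f) 0 = true ↔
      ∃ i : Nat, i + 4 < L ∧ ∀ k : Nat, k < 5 → f (i + k) = some role := by
  rw [run5go_iff role _ 0 le_rfl]
  constructor
  · rintro ⟨j, hj, h4, hall⟩
    simp only [List.length_map, List.length_range] at hj
    have hj4 : 4 ≤ j := by omega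
    
    refine ⟨j - 4, by omega, fun k hk => ?_⟩
    have := hall (j - 4 + k) (by omega) (by omega)
    rw [List.getElem?_map] at this
    rw [List.getElem?_range (by omega)] at this
    simpa using this
  · rintro ⟨i, hi, hall⟩
    refine ⟨i + 4, by simpa using hi, by push_cast; omega, fun t ht hle => ?_⟩
    rw [List.getElem?_map, List.getElem?_range (by omega)]
    have := hall (t - i) (by omega)
    simp only [show i + (t - i) = t by omega] at this
    simp [this]

theorem cellB_eq (field : List (List String)) (role : String) (x y : Int) (hx : 0 ≤ x) :
    (cellB field x y = some role) ↔ cellOk field x y role = true := by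
  unfold cellB cellOk
  by_cases hxl : x < (field.length : Int)
  · simp only [hx, hxl, decide_true, Bool.true_and]
    by_cases hy : 0 ≤ y ∧ y < ((((PySem.List.pyGet? field x).getD []).length : Nat) : Int)
    · simp [hy.1, hy.2, beq_iff_eq]
    · rcases not_and_or.mp hy with h | h <;> simp [h]
  · have hnone : PySem.List.pyGet? field x = none := by
      rw [PySem.List.pyGet?_eq_none_iff]
      intro hin
      exact hxl hin.2
    simp [hnone, hxl]

theorem rowlen_le (field : List (List String)) (r : List String) (hr : r ∈ field) :
    r.length ≤ field.foldl (fun a r => max a r.length) 0 :=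
  (PySem.List.le_foldl_max_nat field (fun r => r.length) 0).2 r hr
theorem winB_iff (field : List (List String)) (role : String) (x y dx dy : Int) :
    winB field role x y dx dy = true ↔
      ∀ k : Nat, k < 5 → cellOk field (x + k * dx) (y + k * dy) role = true := by
  simp only [winB, Bool.and_eq_true, and_assoc]
  constructor
  · rintro ⟨h0, h1, h2, h3, h4⟩ k hk
    interval_cases k
    · simpa using h0
    · simpa using h1
    · have := h2; push_cast; exact this
    · have := h3; push_cast; exact this
    · have := h4; push_cast; exact this
  · intro h
    refine ⟨?_, ?_, ?_, ?_, ?_⟩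
    · simpa using h 0 (by omega)
    · simpa using h 1 (by omega)
    · have := h 2 (by omega); push_cast at this; exact this
    · have := h 3 (by omega); push_cast at this; exact this
    · have := h 4 (by omega); push_cast at this; exact this

theorem B_iff (field : List (List String)) (role : String) :
    has_five_alt field role = true ↔ HasWin field role := by
  unfold has_five_alt
  simp only [List.any_append, Bool.or_eq_true, List.any_map, List.any_eq_true,
    List.mem_range, Function.comp, run5_line_iff, PySem.List.mem_pyRange_one]
  unfold HasWin
  constructor
  · rintro (((⟨x, hx, i, hi, hall⟩ | ⟨y, hy, i, hi, hall⟩) | ⟨c, ⟨hc1, hc2⟩, i, hi, hall⟩) |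
      ⟨c, hc, i, hi, hall⟩)
    · refine ⟨(x : Int), (i : Int), Or.inr (Or.inl ?_)⟩
      rw [winB_iff]; intro k hk
      have h := (cellB_eq field role _ _ (Int.natCast_nonneg x)).mp (hall k hk)
      rw [show ((x : Int) + (k : Int) * 0) = (x : Int) from by ring,
        show ((i : Int) + (k : Int) * 1) = ((i + k : Nat) : Int) from by push_cast; ring]
      exact h
    · refine ⟨(i : Int), (y : Int), Or.inl ?_⟩
      rw [winB_iff]; intro k hk
      have h := (cellB_eq field role _ _ (Int.natCast_nonneg _)).mp (hall k hk)
      rw [show ((i : Int) + (k : Int) * 1) = ((i + k : Nat) : Int) from by push_cast; ring,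
        show ((y : Int) + (k : Int) * 0) = (y : Int) from by ring]
      exact h
    · refine ⟨(i : Int), c + (i : Int), Or.inr (Or.inr (Or.inl ?_))⟩
      rw [winB_iff]; intro k hk
      have h := (cellB_eq field role _ _ (Int.natCast_nonneg _)).mp (hall k hk)
      rw [show ((i : Int) + (k : Int) * 1) = ((i + k : Nat) : Int) from by push_cast; ring,
        show (c + (i : Int) + (k : Int) * 1) = c + ((i + k : Nat) : Int) from by push_cast; ring]
      exact h
    · refine ⟨(i : Int), (c : Int) - (i : Int), Or.inr (Or.inr (Or.inr ?_))⟩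
      rw [winB_iff]; intro k hk
      have h := (cellB_eq field role _ _ (Int.natCast_nonneg _)).mp (hall k hk)
      rw [show ((i : Int) + (k : Int) * 1) = ((i + k : Nat) : Int) from by push_cast; ring,
        show ((c : Int) - (i : Int) + (k : Int) * (-1)) = (c : Int) - ((i + k : Nat) : Int) from by
          push_cast; ring]
      exact h
  · rintro ⟨x, y, (hw | hw | hw | hw)⟩ <;> rw [winB_iff] at hw <;>
      [skip; skip; skip; skip] <;>
      (have h0 : cellOk field x y role = true := by simpa using hw 0 (by omega)) <;>
      obtain ⟨hx0, hxh, hy0, hyr, -⟩ := cellOk_elim h0 <;>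
      (have hrow : ((PySem.List.pyGet? field x).getD []) ∈ field := by
        rw [PySem.List.pyGet?_eq_some_getElem field hx0 hxh]
        exact List.getElem_mem _) <;>
      (have hlw : ((((PySem.List.pyGet? field x).getD []).length : Nat) : Int) ≤
          ((List.foldl (fun a r => max a r.length) 0 field : Nat) : Int) := by
        exact_mod_cast rowlen_le field _ hrow)
    -- direction (1,0): columns family
    · obtain ⟨-, hxh4, -, -, -⟩ := cellOk_elim (hw 4 (by omega))
      push_cast at hxh4
      refine Or.inl (Or.inl (Or.inr ⟨y.toNat, by omega, x.toNat, by omega, fun k hk => ?_⟩))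
      rw [cellB_eq field role _ _ (Int.natCast_nonneg _),
        show ((x.toNat + k : Nat) : Int) = x + (k : Int) * 1 from by push_cast; omega,
        show ((y.toNat : Nat) : Int) = y + (k : Int) * 0 from by omega]
      exact hw k hk
    -- direction (0,1): rows family
    · have h4 : cellOk field x (y + 4) role = true := by simpa using hw 4 (by omega)
      obtain ⟨-, -, -, hyr4, -⟩ := cellOk_elim h4
      refine Or.inl (Or.inl (Or.inl ⟨x.toNat, by omega, y.toNat, by omega, fun k hk => ?_⟩))
      rw [cellB_eq field role _ _ (Int.natCast_nonneg _),
        show ((x.toNat : Nat) : Int) = x + (k : Int) * 0 from by omega,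
        show ((y.toNat + k : Nat) : Int) = y + (k : Int) * 1 from by push_cast; omega]
      exact hw k hk
    -- direction (1,1): diagonal family
    · obtain ⟨-, hxh4, -, -, -⟩ := cellOk_elim (hw 4 (by omega))
      push_cast at hxh4
      refine Or.inl (Or.inr ⟨y - x, ⟨by omega, by omega⟩, x.toNat, by omega, fun k hk => ?_⟩)
      rw [cellB_eq field role _ _ (Int.natCast_nonneg _),
        show ((x.toNat + k : Nat) : Int) = x + (k : Int) * 1 from by push_cast; omega,
        show (y - x + (x + (k : Int) * 1)) = y + (k : Int) * 1 from by ring]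
      exact hw k hk
    -- direction (1, -1): anti-diagonal family
    · obtain ⟨-, hxh4, -, -, -⟩ := cellOk_elim (hw 4 (by omega))
      push_cast at hxh4
      refine Or.inr ⟨(x + y).toNat, by omega, x.toNat, by omega, fun k hk => ?_⟩
      rw [cellB_eq field role _ _ (Int.natCast_nonneg _),
        show ((x.toNat + k : Nat) : Int) = x + (k : Int) * 1 from by push_cast; omega,
        show ((((x + y).toNat : Nat) : Int) - (x + (k : Int) * 1)) = y + (k : Int) * (-1)
          from by omega]
      exact hw k hk

-- ===== VERDICT (by name: the statement is the Claim_ definition above) =====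
theorem has_five_spec : Claim_equal_has_five := by
  intro field role _
  show has_five field role = has_five_alt field role
  have := (A_iff field role).trans (B_iff field role).symm
  exact Bool.eq_iff_iff.mpr this
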